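-- pv_equiv track=rewrite | github.com/Hulyamr13/Python_Advanced_may_2023 | Algorithms with Python/Exam Preparation/Exam  20 August 2022/The Tyrant.py | find_minimum_sum
-- ===== SOURCE A (Python) =====
-- def find_minimum_sum(sequence):
--     n = len(sequence)
--     dp = [0] * n
--
--     if n < 5:
--         return min(sequence)
--
--     dp[0:4] = sequence[0:4]
--
--     for i in range(4, n):
--         dp[i] = sequence[i] + min(dp[i - 4:i])
--
--     return min(dp[n - 4:n])
-- ===== SOURCE B (Python) =====
-- def find_minimum_sum(sequence):
--     n = len(sequence)
--     if n < 5: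
--         return min(sequence)
--
--     def elem(x):
--         # (min,+) matrix of one DP step: shift the window, append x + min(window)
--         return [[None, 0, None, None],
--                 [None, None, 0, None],
--                 [None, None, None, 0],
--                 [x, x, x, x]]
--
--     def mul(P, Q):
--         # (min,+) matrix product; None is +infinity
--         cols = list(zip(Q[0], Q[1], Q[2], Q[3]))
--         R = []
--         for p0, p1, p2, p3 in P:
--             row = []
--             for q0, q1, q2, q3 in cols:
--                 best = None
--                 if p0 is not None and q0 is not None:
--                     best = p0 + q0
--                 if p1 is not None and q1 is not None:
--                     t = p1 + q1
--                     if best is None or t < best: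
--                         best = t
--                 if p2 is not None and q2 is not None:
--                     t = p2 + q2
--                     if best is None or t < best:
--                         best = t
--                 if p3 is not None and q3 is not None:
--                     t = p3 + q3
--                     if best is None or t < best:
--                         best = t
--                 row.append(best)
--             R.append(row)
--         return R
--
--     def seg(lo, hi):
--         # transform matrix of DP steps for indices [lo, hi), by divide and conquer
--         if hi - lo == 1:
--             return elem(sequence[lo])
--         mid = (lo + hi) // 2
--         return mul(seg(mid, hi), seg(lo, mid))
--
--     M = seg(4, n)
--     v = sequence[:4]
--     w = []
--     for m0, m1, m2, m3 in M:
--         best = None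
--         if m0 is not None:
--             best = m0 + v[0]
--         if m1 is not None:
--             t = m1 + v[1]
--             if best is None or t < best:
--                 best = t
--         if m2 is not None:
--             t = m2 + v[2]
--             if best is None or t < best:
--                 best = t
--         if m3 is not None:
--             t = m3 + v[3]
--             if best is None or t < best:
--                 best = t
--         w.append(best)
--     return min(w)
-- ===== Notes on version B (the rewrite author's own statement) =====
-- stated objective: alternative
-- what changed: Replaced the forward dp-array loop with a divide-and-conquer (min,+)-semiring algorithm: each index contributes a 4x4 step matrix, segment matrices are combined recursively by min-plus matrix product, and the full transform is applied once to the initial four-element window.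
-- outside the precondition, e.g. on find_minimum_sum([]): A raises ValueError, B raises ValueError
import Mathlib
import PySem

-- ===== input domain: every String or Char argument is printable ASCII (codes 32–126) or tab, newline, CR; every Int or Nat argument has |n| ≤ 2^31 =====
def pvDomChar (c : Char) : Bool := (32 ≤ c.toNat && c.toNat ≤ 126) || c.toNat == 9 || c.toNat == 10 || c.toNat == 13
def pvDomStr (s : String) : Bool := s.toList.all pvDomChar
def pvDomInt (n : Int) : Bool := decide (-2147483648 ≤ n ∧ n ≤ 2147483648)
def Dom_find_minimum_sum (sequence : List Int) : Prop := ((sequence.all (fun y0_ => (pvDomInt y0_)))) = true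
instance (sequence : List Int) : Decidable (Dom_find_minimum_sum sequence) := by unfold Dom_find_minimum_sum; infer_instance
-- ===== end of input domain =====

-- B replaces A's forward dp-array loop by a divide-and-conquer product of 4x4 (min,+) step matrices applied once to the initial window (alternative algorithm, similar cost).

-- ===== PORT A =====
-- min(xs) with no key; the default 0 is never reached: every list either port applies it to is nonempty under Pre_
def pymin (xs : List Int) : Int := (PySem.List.min? xs (fun x => x)).getD 0

def find_minimum_sum (sequence : List Int) : Int :=
  let n := sequence.length
  let dp : List Int := List.replicate n 0
  if n < 5 then pymin sequence
  else
    let dp := PySem.List.slice sequence (some 0) (some 4) ++ dp.drop 4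
    let dp := (PySem.List.pyRange 4 (n : Int) 1).foldl
      (fun dp i =>
        PySem.List.pySetD dp i
          (PySem.List.pyGetD sequence i 0 + pymin (PySem.List.slice dp (some (i - 4)) (some i)))) dp
    pymin (PySem.List.slice dp (some ((n : Int) - 4)) (some (n : Int)))

-- ===== PORT B =====
-- (min,+) semiring with none = +infinity: oadd is absorbing in none, omin's identity is none
def oadd : Option Int → Option Int → Option Int
  | none, _ => none
  | _, none => none
  | some x, some y => some (x + y)

def omin : Option Int → Option Int → Option Int
  | none, b => b
  | a, none => a
  | some x, some y => some (min x y)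

structure OVec where
  a : Option Int
  b : Option Int
  c : Option Int
  d : Option Int
deriving DecidableEq, Repr

structure PMat where
  r0 : OVec
  r1 : OVec
  r2 : OVec
  r3 : OVec
deriving DecidableEq, Repr

-- the inner 'best = None; for k …' accumulation of Source B: min-plus dot product of a row with a column/vector
def dot (r v : OVec) : Option Int :=
  omin (omin (omin (oadd r.a v.a) (oadd r.b v.b)) (oadd r.c v.c)) (oadd r.d v.d)

def colA (Q : PMat) : OVec := ⟨Q.r0.a, Q.r1.a, Q.r2.a, Q.r3.a⟩
def colB (Q : PMat) : OVec := ⟨Q.r0.b, Q.r1.b, Q.r2.b, Q.r3.b⟩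
def colC (Q : PMat) : OVec := ⟨Q.r0.c, Q.r1.c, Q.r2.c, Q.r3.c⟩
def colD (Q : PMat) : OVec := ⟨Q.r0.d, Q.r1.d, Q.r2.d, Q.r3.d⟩

-- Source B's mul(P, Q): (min,+) matrix product
def pmul (P Q : PMat) : PMat :=
  ⟨⟨dot P.r0 (colA Q), dot P.r0 (colB Q), dot P.r0 (colC Q), dot P.r0 (colD Q)⟩,
   ⟨dot P.r1 (colA Q), dot P.r1 (colB Q), dot P.r1 (colC Q), dot P.r1 (colD Q)⟩,
   ⟨dot P.r2 (colA Q), dot P.r2 (colB Q), dot P.r2 (colC Q), dot P.r2 (colD Q)⟩,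
   ⟨dot P.r3 (colA Q), dot P.r3 (colB Q), dot P.r3 (colC Q), dot P.r3 (colD Q)⟩⟩

-- Source B's elem(x): the step matrix of one DP step
def pelem (x : Int) : PMat :=
  ⟨⟨none, some 0, none, none⟩,
   ⟨none, none, some 0, none⟩,
   ⟨none, none, none, some 0⟩,
   ⟨some x, some x, some x, some x⟩⟩

-- Source B's seg(lo, hi) over the segment's elements: Python's mid = (lo+hi)//2 splits a
-- segment of size s into sizes s//2 and s - s//2, i.e. take (len/2) / drop (len/2)
def segMat (xs : List Int) : PMat :=
  if h : xs.length ≤ 1 then pelem (xs.headD 0)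
  else
    pmul (segMat (xs.drop (xs.length / 2))) (segMat (xs.take (xs.length / 2)))
termination_by xs.length
decreasing_by
  · simp only [List.length_drop]; omega
  · simp only [List.length_take]; omega

-- Source B's final 'w' loop: apply the matrix to the window vector
def papply (M : PMat) (v : OVec) : OVec :=
  ⟨dot M.r0 v, dot M.r1 v, dot M.r2 v, dot M.r3 v⟩

def find_minimum_sum_alt (sequence : List Int) : Int :=
  if sequence.length < 5 then pymin sequence
  else
    match sequence with
    | a :: b :: c :: d :: rest =>
      let M := segMat rest
      let w := papply M ⟨some a, some b, some c, some d⟩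
      -- Python's min(w) over four ints; the entries are finite here, the default 0 is never reached
      (omin (omin (omin w.a w.b) w.c) w.d).getD 0
    | _ => 0  -- unreachable: the list has length ≥ 5 in this branch

-- ===== PRECONDITION & SPEC =====
-- Pre_ excludes only the empty list, on which Python's min([]) raises ValueError (in A and in B alike).
def Pre_find_minimum_sum (sequence : List Int) : Prop := sequence ≠ []
instance (sequence : List Int) : Decidable (Pre_find_minimum_sum sequence) := by unfold Pre_find_minimum_sum; infer_instance
def pvWitness_find_minimum_sum : List Int := [1]

def Spec_find_minimum_sum (sequence : List Int) (out : Int) : Prop := out = find_minimum_sum_alt sequence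
instance (sequence : List Int) (out : Int) : Decidable (Spec_find_minimum_sum sequence out) := by unfold Spec_find_minimum_sum; infer_instance

-- ===== CLAIM (what is proved, stated in full; the proofs are below) =====
def Claim_equal_find_minimum_sum : Prop := ∀ (sequence : List Int), Dom_find_minimum_sum sequence → Pre_find_minimum_sum sequence → Spec_find_minimum_sum sequence (find_minimum_sum sequence)

-- ===== LEMMAS AND PROOFS =====

-- the recurrence both programs compute: cost of the cheapest path ending at index i
def best (seq : List Int) (i : Nat) : Int :=
  if i < 4 then seq.getD i 0
  else seq.getD i 0 +
    min (min (min (best seq (i - 4)) (best seq (i - 3))) (best seq (i - 2))) (best seq (i - 1))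
termination_by i
decreasing_by all_goals omega

theorem best_lt (seq : List Int) (i : Nat) (h : i < 4) : best seq i = seq.getD i 0 := by
  rw [best, if_pos h]

theorem best_ge (seq : List Int) (i : Nat) (h : ¬ i < 4) :
    best seq i = seq.getD i 0 +
      min (min (min (best seq (i - 4)) (best seq (i - 3))) (best seq (i - 2))) (best seq (i - 1)) := by
  rw [best, if_neg h]

theorem pymin_four (a b c d : Int) : pymin [a, b, c, d] = min (min (min a b) c) d := by
  rw [pymin, PySem.List.min?_id_cons]
  simp [List.foldl]

theorem drop_take_four (l : List Int) (m : Nat) (h : m + 4 ≤ l.length) :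
    (l.drop m).take 4 = [l.getD m 0, l.getD (m + 1) 0, l.getD (m + 2) 0, l.getD (m + 3) 0] := by
  induction m generalizing l with
  | zero =>
    match l, h with
    | a :: b :: c :: d :: rest, _ => simp
  | succ m ih =>
    match l, h with
    | x :: l', h =>
      simp only [List.drop_succ_cons, List.getD_cons_succ]
      exact ih l' (by simpa using h)

theorem getD_set_invar (l : List Int) (i j : Nat) (v : Int) (h : i < l.length) :
    (l.set i v).getD j 0 = if j = i then v else l.getD j 0 := by
  have := PySem.List.pyGetD_pySetD_natCast l i j v 0 h
  simpa using this

-- A's loop invariant: after the fold over range(4, 4+t), dp holds best on [0, 4+t)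
theorem Aloop (seq : List Int) (dp0 : List Int) (hlen : dp0.length = seq.length)
    (hlo : ∀ j : Nat, j < 4 → dp0.getD j 0 = best seq j) :
    ∀ t : Nat, 4 + t ≤ seq.length →
      ((PySem.List.pyRange 4 ((4 + t : Nat) : Int) 1).foldl
        (fun dp i =>
          PySem.List.pySetD dp i
            (PySem.List.pyGetD seq i 0 + pymin (PySem.List.slice dp (some (i - 4)) (some i)))) dp0).length = seq.length ∧
      (∀ j : Nat, j < 4 + t →
        ((PySem.List.pyRange 4 ((4 + t : Nat) : Int) 1).foldl
        (fun dp i =>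
          PySem.List.pySetD dp i
            (PySem.List.pyGetD seq i 0 + pymin (PySem.List.slice dp (some (i - 4)) (some i)))) dp0).getD j 0 = best seq j) := by
  intro t
  induction t with
  | zero =>
    intro h
    have : PySem.List.pyRange 4 ((4 + 0 : Nat) : Int) 1 = [] := by
      apply PySem.List.pyRange_one_eq_nil; norm_num
    rw [this]
    simp only [List.foldl_nil]
    exact ⟨hlen, fun j hj => hlo j hj⟩
  | succ t ih =>
    intro h
    have ht : 4 + t ≤ seq.length := by omega
    obtain ⟨ihlen, ihval⟩ := ih ht
    have hcast : ((4 + (t + 1) : Nat) : Int) = ((4 + t : Nat) : Int) + 1 := by push_cast; ring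
    have hsplit : PySem.List.pyRange 4 ((4 + (t + 1) : Nat) : Int) 1
        = PySem.List.pyRange 4 ((4 + t : Nat) : Int) 1 ++ [((4 + t : Nat) : Int)] := by
      rw [hcast, PySem.List.pyRange_one_succ_right (by exact_mod_cast Nat.le_add_right 4 t)]
    rw [hsplit, List.foldl_append]
    set dpk := (PySem.List.pyRange 4 ((4 + t : Nat) : Int) 1).foldl
        (fun dp i =>
          PySem.List.pySetD dp i
            (PySem.List.pyGetD seq i 0 + pymin (PySem.List.slice dp (some (i - 4)) (some i)))) dp0 with hdpk
    simp only [List.foldl_cons, List.foldl_nil]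
    have hsub : ((4 + t : Nat) : Int) - 4 = ((t : Nat) : Int) := by push_cast; ring
    have hslice : PySem.List.slice dpk (some (((4 + t : Nat) : Int) - 4)) (some ((4 + t : Nat) : Int))
        = (dpk.drop t).take 4 := by
      rw [hsub, PySem.List.slice_natCast]
      congr 1; omega
    have hwin : (dpk.drop t).take 4
        = [dpk.getD t 0, dpk.getD (t + 1) 0, dpk.getD (t + 2) 0, dpk.getD (t + 3) 0] :=
      drop_take_four dpk t (by omega)
    have hbest : PySem.List.pyGetD seq ((4 + t : Nat) : Int) 0
        + pymin (PySem.List.slice dpk (some (((4 + t : Nat) : Int) - 4)) (some ((4 + t : Nat) : Int)))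
        = best seq (4 + t) := by
      rw [hslice, hwin, pymin_four]
      rw [ihval t (by omega), ihval (t+1) (by omega), ihval (t+2) (by omega), ihval (t+3) (by omega)]
      rw [best_ge seq (4 + t) (by omega)]
      have e1 : 4 + t - 4 = t := by omega
      have e2 : 4 + t - 3 = t + 1 := by omega
      have e3 : 4 + t - 2 = t + 2 := by omega
      have e4 : 4 + t - 1 = t + 3 := by omega
      rw [e1, e2, e3, e4]
      rw [PySem.List.pyGetD_natCast]
    rw [hbest]
    simp only [PySem.List.pySetD_natCast]
    constructor
    · simp [ihlen]
    · intro j hj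
      rw [getD_set_invar _ _ _ _ (by omega)]
      by_cases hje : j = 4 + t
      · simp [hje]
      · rw [if_neg hje]
        exact ihval j (by omega)

-- ---- (min,+) algebra ----

theorem omin_comm (a b : Option Int) : omin a b = omin b a := by
  cases a <;> cases b <;> simp [omin, min_comm]

theorem omin_assoc (a b c : Option Int) : omin (omin a b) c = omin a (omin b c) := by
  cases a <;> cases b <;> cases c <;> simp [omin, min_assoc]

theorem omin_left_comm (a b c : Option Int) : omin a (omin b c) = omin b (omin a c) := by
  rw [← omin_assoc, omin_comm a b, omin_assoc]

theorem oadd_assoc (a b c : Option Int) : oadd (oadd a b) c = oadd a (oadd b c) := by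
  cases a <;> cases b <;> cases c <;> simp [oadd, Int.add_assoc]

theorem oadd_omin_left (a b c : Option Int) : oadd a (omin b c) = omin (oadd a b) (oadd a c) := by
  cases a <;> cases b <;> cases c <;> simp [oadd, omin] <;> omega

theorem oadd_omin_right (a b c : Option Int) : oadd (omin a b) c = omin (oadd a c) (oadd b c) := by
  cases a <;> cases b <;> cases c <;> simp [oadd, omin] <;> omega

theorem oadd_zero_left (v : Option Int) : oadd (some 0) v = v := by
  cases v <;> simp [oadd]

-- the interchange law: applying a product is applying the factors in turn
theorem dot_mulRow (r : OVec) (Q : PMat) (v : OVec) :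
    dot ⟨dot r (colA Q), dot r (colB Q), dot r (colC Q), dot r (colD Q)⟩ v
      = dot r ⟨dot Q.r0 v, dot Q.r1 v, dot Q.r2 v, dot Q.r3 v⟩ := by
  obtain ⟨ra, rb, rc, rd⟩ := r
  obtain ⟨⟨a00, a01, a02, a03⟩, ⟨a10, a11, a12, a13⟩, ⟨a20, a21, a22, a23⟩, ⟨a30, a31, a32, a33⟩⟩ := Q
  obtain ⟨va, vb, vc, vd⟩ := v
  simp only [dot, colA, colB, colC, colD,
    oadd_omin_left, oadd_omin_right, oadd_assoc, omin_assoc]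
  simp only [omin_comm, omin_left_comm]

theorem papply_pmul (P Q : PMat) (v : OVec) :
    papply (pmul P Q) v = papply P (papply Q v) := by
  obtain ⟨p0, p1, p2, p3⟩ := P
  simp only [pmul, papply, dot_mulRow]

-- the OVec step corresponding to one element
def stepO (x : Int) (v : OVec) : OVec :=
  ⟨v.b, v.c, v.d, oadd (some x) (omin (omin (omin v.a v.b) v.c) v.d)⟩

theorem papply_pelem (x : Int) (v : OVec) : papply (pelem x) v = stepO x v := by
  obtain ⟨va, vb, vc, vd⟩ := v
  simp only [papply, pelem, stepO, dot, oadd_zero_left, oadd_omin_left]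
  cases va <;> cases vb <;> cases vc <;> cases vd <;> simp [oadd, omin]

-- D&C correctness: the segment matrix applied to v is the left fold of the steps
theorem segMat_apply (n : Nat) : ∀ xs : List Int, xs.length = n → xs ≠ [] →
    ∀ v : OVec, papply (segMat xs) v = xs.foldl (fun w x => stepO x w) v := by
  induction n using Nat.strong_induction_on with
  | _ n ih =>
    intro xs hn hne v
    rw [segMat]
    by_cases h1 : xs.length ≤ 1
    · rw [dif_pos h1]
      match xs, hne, h1 with
      | [x], _, _ => simp [papply_pelem, List.foldl]
    · rw [dif_neg h1]
      have hlen : 2 ≤ xs.length := by omega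
      set m := xs.length / 2 with hm
      have hm1 : 1 ≤ m := by omega
      have hmlt : m < xs.length := by omega
      have htl : (xs.take m).length = m := by simp; omega
      have hdl : (xs.drop m).length = xs.length - m := by simp
      rw [papply_pmul]
      rw [ih (xs.take m).length (by omega) _ rfl (by
            intro hh; rw [hh] at htl; simp at htl; omega)]
      rw [ih (xs.drop m).length (by omega) _ rfl (by
            intro hh; rw [hh] at hdl; simp at hdl; omega)]
      rw [← List.foldl_append, List.take_append_drop]

-- the Int rolling step (what stepO computes on finite entries)
def stepI (s : Int × Int × Int × Int) (x : Int) : Int × Int × Int × Int :=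
  (s.2.1, s.2.2.1, s.2.2.2, x + min (min (min s.1 s.2.1) s.2.2.1) s.2.2.2)

def embed (s : Int × Int × Int × Int) : OVec := ⟨some s.1, some s.2.1, some s.2.2.1, some s.2.2.2⟩

theorem stepO_embed (x : Int) (s : Int × Int × Int × Int) :
    stepO x (embed s) = embed (stepI s x) := by
  obtain ⟨a, b, c, d⟩ := s
  simp [stepO, stepI, embed, omin, oadd, Int.add_comm]

theorem foldl_stepO_embed (l : List Int) (s : Int × Int × Int × Int) :
    l.foldl (fun w x => stepO x w) (embed s) = embed (l.foldl stepI s) := by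
  induction l generalizing s with
  | nil => rfl
  | cons x l' ih => rw [List.foldl_cons, List.foldl_cons, stepO_embed, ih]

-- the fold of stepI from the first four values lands on the last four best values
theorem Bloop (seq : List Int) :
    ∀ (l : List Int) (k : Nat), k + 4 ≤ seq.length → seq.drop (k + 4) = l →
      l.foldl stepI (best seq k, best seq (k + 1), best seq (k + 2), best seq (k + 3))
      = (best seq (seq.length - 4), best seq (seq.length - 3),
         best seq (seq.length - 2), best seq (seq.length - 1)) := by
  intro l
  induction l with
  | nil =>
    intro k hk hd
    have hlen : seq.length = k + 4 := by
      have := congrArg List.length hd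
      simp [List.length_drop] at this
      omega
    have e1 : seq.length - 4 = k := by omega
    have e2 : seq.length - 3 = k + 1 := by omega
    have e3 : seq.length - 2 = k + 2 := by omega
    have e4 : seq.length - 1 = k + 3 := by omega
    rw [e1, e2, e3, e4]
    rfl
  | cons x l' ih =>
    intro k hk hd
    have hklt : k + 4 < seq.length := by
      have := congrArg List.length hd
      simp [List.length_drop] at this
      omega
    rw [List.drop_eq_getElem_cons hklt] at hd
    injection hd with hx hl'
    rw [List.foldl_cons]
    have hb : stepI (best seq k, best seq (k + 1), best seq (k + 2), best seq (k + 3)) x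
        = (best seq (k + 1), best seq (k + 2), best seq (k + 3), best seq (k + 4)) := by
      simp only [stepI]
      rw [best_ge seq (k + 4) (by omega)]
      have e1 : k + 4 - 4 = k := by omega
      have e2 : k + 4 - 3 = k + 1 := by omega
      have e3 : k + 4 - 2 = k + 2 := by omega
      have e4 : k + 4 - 1 = k + 3 := by omega
      rw [e1, e2, e3, e4, ← hx]
      rw [List.getD_eq_getElem seq 0 hklt]
    rw [hb]
    have h5 : List.drop (k + 1 + 4) seq = l' := by
      have e : k + 1 + 4 = k + 4 + 1 := by omega
      rw [e]; exact hl'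
    have h := ih (k + 1) (by omega) h5
    have e2 : k + 1 + 1 = k + 2 := by omega
    have e3 : k + 1 + 2 = k + 3 := by omega
    have e4 : k + 1 + 3 = k + 4 := by omega
    rw [e2, e3, e4] at h
    exact h

theorem main_eq (seq : List Int) : find_minimum_sum seq = find_minimum_sum_alt seq := by
  by_cases h5 : seq.length < 5
  · simp [find_minimum_sum, find_minimum_sum_alt, h5]
  · have hn : 5 ≤ seq.length := by omega
    match seq, hn with
    | a :: b :: c :: d :: rest, hn =>
      set seq := a :: b :: c :: d :: rest with hseq
      set n := seq.length with hnn
      have hdp0 : PySem.List.slice seq (some 0) (some 4) ++ (List.replicate n (0:Int)).drop 4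
          = seq.take 4 ++ (List.replicate n (0:Int)).drop 4 := by
        rw [PySem.List.slice_zero_start, PySem.List.slice_to seq (by norm_num)]
        simp
      have hlen0 : (seq.take 4 ++ (List.replicate n (0:Int)).drop 4).length = n := by
        simp [hnn]
        omega
      have hlo : ∀ j : Nat, j < 4 → (seq.take 4 ++ (List.replicate n (0:Int)).drop 4).getD j 0 = best seq j := by
        intro j hj
        rw [List.getD_append _ _ _ _ (by simp [hnn]; omega)]
        rw [best_lt seq j hj]
        simp [List.getD_eq_getElem?_getD, List.getElem?_take, hj]
      have hA := Aloop seq _ hlen0 hlo (n - 4) (by omega)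
      have hcast4 : ((4 + (n - 4) : Nat) : Int) = (n : Int) := by
        have : 4 + (n - 4) = n := by omega
        rw [this]
      rw [hcast4] at hA
      obtain ⟨hAlen, hAval⟩ := hA
      set dpn := (PySem.List.pyRange 4 (n : Int) 1).foldl
        (fun dp i =>
          PySem.List.pySetD dp i
            (PySem.List.pyGetD seq i 0 + pymin (PySem.List.slice dp (some (i - 4)) (some i))))
        (seq.take 4 ++ (List.replicate n (0:Int)).drop 4) with hdpn
      have hAresult : find_minimum_sum seq
          = min (min (min (best seq (n - 4)) (best seq (n - 3))) (best seq (n - 2))) (best seq (n - 1)) := by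
        rw [find_minimum_sum]
        simp only [← hnn]
        rw [if_neg (by omega)]
        rw [hdp0, ← hdpn]
        have hsub : (n : Int) - 4 = ((n - 4 : Nat) : Int) := by omega
        rw [hsub, PySem.List.slice_natCast]
        have htake : n - (n - 4) = 4 := by omega
        rw [htake, drop_take_four dpn (n - 4) (by omega)]
        rw [hAval (n - 4) (by omega), pymin_four]
        have e2 : n - 4 + 1 = n - 3 := by omega
        have e3 : n - 4 + 2 = n - 2 := by omega
        have e4 : n - 4 + 3 = n - 1 := by omega
        rw [e2, e3, e4]
        rw [hAval (n - 3) (by omega), hAval (n - 2) (by omega), hAval (n - 1) (by omega)]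
      have hinit : (a, b, c, d) = (best seq 0, best seq 1, best seq 2, best seq 3) := by
        rw [best_lt seq 0 (by omega), best_lt seq 1 (by omega), best_lt seq 2 (by omega), best_lt seq 3 (by omega)]
        simp [hseq]
      have hrest_ne : rest ≠ [] := by
        intro hh
        rw [hseq] at hnn
        rw [hh] at hnn
        simp at hnn
        omega
      have hdrop : seq.drop (0 + 4) = rest := by simp [hseq]
      have hB := Bloop seq rest 0 (by omega) hdrop
      simp only [Nat.zero_add] at hB
      have hBresult : find_minimum_sum_alt seq
          = min (min (min (best seq (n - 4)) (best seq (n - 3))) (best seq (n - 2))) (best seq (n - 1)) := by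
        rw [find_minimum_sum_alt]
        rw [if_neg (by omega)]
        show (omin (omin (omin (papply (segMat rest) ⟨some a, some b, some c, some d⟩).a
            (papply (segMat rest) ⟨some a, some b, some c, some d⟩).b)
            (papply (segMat rest) ⟨some a, some b, some c, some d⟩).c)
            (papply (segMat rest) ⟨some a, some b, some c, some d⟩).d).getD 0 = _
        have hv : (⟨some a, some b, some c, some d⟩ : OVec) = embed (a, b, c, d) := rfl
        rw [hv, segMat_apply rest.length rest rfl hrest_ne, foldl_stepO_embed, hinit, hB]
        simp only [embed, omin, Option.getD_some]
        rw [hnn]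
      rw [hAresult, hBresult]

-- ===== VERDICT (by name: the statement is the Claim_ definition above) =====
theorem find_minimum_sum_spec : Claim_equal_find_minimum_sum := by
  intro sequence _ _
  exact main_eq sequence
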